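-- pv_equiv track=rewrite | github.com/wyk18703232953/myResearch | codeComplex/data copy/filteredData/python/quadratic/python_quadratic_0110.py | generate_maps
-- ===== SOURCE A (Python) =====
-- def vFlip(m):
--     return [list(reversed(row)) for row in m]
--
-- def hFlip(m):
--     return list(reversed(m))
--
-- def rotate(m):
--     return [list(row) for row in zip(*reversed(m))]
--
-- def generate_maps(n):
--     # Generate a deterministic n x n map1 of characters
--     map1 = [[chr(65 + (i + j) % 26) for j in range(n)] for i in range(n)]
--
--     # For map2, choose a deterministic transformation of map1 based on n
--     t = n % 8
--     if t == 0:
--         map2 = [row[:] for row in map1]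
--     elif t == 1:
--         map2 = vFlip(map1)
--     elif t == 2:
--         map2 = hFlip(map1)
--     elif t == 3:
--         map2 = vFlip(hFlip(map1))
--     elif t == 4:
--         map2 = rotate(map1)
--     elif t == 5:
--         map2 = rotate(rotate(map1))
--     elif t == 6:
--         map2 = vFlip(rotate(map1))
--     else:  # t == 7
--         map2 = hFlip(rotate(map1))
--
--     return map1, map2
-- ===== SOURCE B (Python) =====
-- def generate_maps(n):
--     # One cyclic alphabet row; every row of either map is a slice (or reversed
--     # slice) of it, chosen by a closed-form start index instead of building and
--     # composing flipped/rotated grids.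
--     cyc = [chr(65 + k % 26) for k in range(n + 26)]
--     def asc(s):
--         b = s % 26
--         return cyc[b : b + n]
--     map1 = [asc(i) for i in range(n)]
--     t = n % 8
--     if t in (0, 6):
--         map2 = [asc(i) for i in range(n)]
--     elif t in (1, 4):
--         map2 = [asc(i)[::-1] for i in range(n)]
--     elif t == 2:
--         map2 = [asc(n - 1 - i) for i in range(n)]
--     else:
--         map2 = [asc(n - 1 - i)[::-1] for i in range(n)]
--     return map1, map2
-- ===== Notes on version B (the rewrite author's own statement) =====
-- stated objective: faster
-- what changed: B precomputes one cyclic alphabet row and emits every row of both maps as a slice (or reversed slice) of it starting at a closed-form index per transformation case, eliminating the per-cell character arithmetic of map1 and the vFlip/hFlip/rotate grid compositions; intended as faster, a timing run measured about 1.7-1.8x at the largest size both finished.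
import Mathlib
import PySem

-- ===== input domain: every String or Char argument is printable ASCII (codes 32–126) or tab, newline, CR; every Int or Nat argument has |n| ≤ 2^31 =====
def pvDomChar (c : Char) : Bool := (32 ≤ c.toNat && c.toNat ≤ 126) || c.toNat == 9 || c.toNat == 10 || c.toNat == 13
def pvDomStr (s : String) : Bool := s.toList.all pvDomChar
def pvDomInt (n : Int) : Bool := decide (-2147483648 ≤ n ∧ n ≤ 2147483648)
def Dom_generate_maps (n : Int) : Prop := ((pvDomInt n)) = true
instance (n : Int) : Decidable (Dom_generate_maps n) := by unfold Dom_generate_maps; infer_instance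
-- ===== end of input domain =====

-- B precomputes one cyclic alphabet row and emits every row of both maps as a slice
-- (or reversed slice) of it at a closed-form start index per transformation case
-- (objective: faster; intended as faster — a timing run measured about 1.7-1.8x at the largest size both finished).


-- ===== PORT A =====
-- chr(x) as a one-character string; exact for 0 ≤ x < 0x110000 (here only codes 65..90 occur)
def pyChr (x : Int) : String := String.ofList [Char.ofNat x.toNat]

def vFlipP (m : List (List String)) : List (List String) := m.map (fun row => row.reverse)

def hFlipP (m : List (List String)) : List (List String) := m.reverse

-- zip(*rows), hand-ported: yields tuples until the shortest row is exhausted; zip() of no rows is empty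
def zipStar : List (List String) → List (List String)
  | [] => []
  | r :: rs =>
    if (r :: rs).any (fun l => l.isEmpty) then []
    else (r.headD "" :: rs.map (fun l => l.headD "")) :: zipStar (r.tail :: rs.map (fun l => l.tail))
termination_by m => (m.headD []).length
decreasing_by
  simp_all [List.any_eq_true]
  cases r with
  | nil => simp_all
  | cons a as => simp

-- list(row) of a tuple is the identity under our list encoding
def rotateP (m : List (List String)) : List (List String) := zipStar m.reverse

def generate_maps (n : Int) : List (List String) × List (List String) :=
  let map1 := (PySem.List.pyRange 0 n 1).map (fun i =>
    (PySem.List.pyRange 0 n 1).map (fun j => pyChr (65 + PySem.Int.mod (i + j) 26)))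
  let t := PySem.Int.mod n 8
  let map2 :=
    if t = 0 then map1.map (fun row => row)        -- row[:] copies; identity on values
    else if t = 1 then vFlipP map1
    else if t = 2 then hFlipP map1
    else if t = 3 then vFlipP (hFlipP map1)
    else if t = 4 then rotateP map1
    else if t = 5 then rotateP (rotateP map1)
    else if t = 6 then vFlipP (rotateP map1)
    else hFlipP (rotateP map1)
  (map1, map2)

-- ===== PORT B =====
def generate_maps_alt (n : Int) : List (List String) × List (List String) :=
  let cyc := (PySem.List.pyRange 0 (n + 26) 1).map (fun k => pyChr (65 + PySem.Int.mod k 26))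
  let asc := fun (s : Int) =>
    let b := PySem.Int.mod s 26
    PySem.List.slice cyc (some b) (some (b + n))
  let map1 := (PySem.List.pyRange 0 n 1).map (fun i => asc i)
  let t := PySem.Int.mod n 8
  let map2 :=
    if t = 0 ∨ t = 6 then (PySem.List.pyRange 0 n 1).map (fun i => asc i)
    else if t = 1 ∨ t = 4 then
      -- xs[::-1]
      (PySem.List.pyRange 0 n 1).map (fun i => (PySem.List.slice? (asc i) none none (-1)).getD [])
    else if t = 2 then (PySem.List.pyRange 0 n 1).map (fun i => asc (n - 1 - i))
    else
      (PySem.List.pyRange 0 n 1).map (fun i =>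
        (PySem.List.slice? (asc (n - 1 - i)) none none (-1)).getD [])
  (map1, map2)

-- ===== PRECONDITION & SPEC =====
def Spec_generate_maps (n : Int) (out : List (List String) × List (List String)) : Prop := out = generate_maps_alt n
instance (n : Int) (out : List (List String) × List (List String)) : Decidable (Spec_generate_maps n out) := by unfold Spec_generate_maps; infer_instance

-- ===== CLAIM (what is proved, stated in full; the proofs are below) =====
def Claim_equal_generate_maps : Prop := ∀ (n : Int), Dom_generate_maps n → Spec_generate_maps n (generate_maps n)

-- ===== LEMMAS AND PROOFS =====

def pvGrid (N : Nat) (g : Nat → Nat → String) : List (List String) :=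
  (List.range N).map (fun i => (List.range N).map (g i))

theorem pvRevMapRange {α : Type} (N : Nat) (f : Nat → α) :
    ((List.range N).map f).reverse = (List.range N).map (fun k => f (N - 1 - k)) := by
  rw [← List.map_reverse, List.range_eq_range', List.reverse_range', List.map_map]
  rw [← List.range_eq_range']
  simp only [Function.comp_def, Nat.zero_add]

theorem pvZipStar_nil : zipStar [] = [] := by rw [zipStar.eq_def]

theorem pvZipStar_grid {α : Type} (N : Nat) (L : List α) (h : α → Nat → String) (hL : L ≠ []) :
    zipStar (L.map (fun a => (List.range N).map (h a))) =
      (List.range N).map (fun j => L.map (fun a => h a j)) := by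
  induction N generalizing h with
  | zero =>
    cases L with
    | nil => simp at hL
    | cons a L' =>
      rw [zipStar.eq_def]
      simp
  | succ N ih =>
    have hrow : ∀ a : α, (List.range (N + 1)).map (h a)
        = h a 0 :: (List.range N).map (fun j => h a (j + 1)) := by
      intro a
      rw [List.range_succ_eq_map, List.map_cons, List.map_map]
      rfl
    cases L with
    | nil => simp at hL
    | cons a L' =>
      have hrowF : (fun a : α => (List.range (N + 1)).map (h a))
          = fun a => h a 0 :: (List.range N).map (fun j => h a (j + 1)) := funext hrow
      rw [List.map_cons, hrowF, hrow, zipStar]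
      have hany : ((h a 0 :: (List.range N).map fun j => h a (j + 1)) ::
          L'.map fun a => h a 0 :: (List.range N).map fun j => h a (j + 1)).any
            (fun l => l.isEmpty) = false := by
        simp [List.any_eq_false]
      rw [if_neg (by simp [hany])]
      simp only [Function.comp_def, List.headD_cons, List.tail_cons, List.map_map]
      have := ih (fun a j => h a (j + 1))
      simp only [List.map_cons] at this
      rw [this]
      simp [List.range_succ_eq_map, List.map_map, Function.comp_def]

theorem pvGrid_vFlip (N : Nat) (g : Nat → Nat → String) :
    vFlipP (pvGrid N g) = pvGrid N (fun i j => g i (N - 1 - j)) := by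
  unfold vFlipP pvGrid
  rw [List.map_map]
  apply List.map_congr_left
  intro i _
  exact pvRevMapRange N (g i)

theorem pvGrid_hFlip (N : Nat) (g : Nat → Nat → String) :
    hFlipP (pvGrid N g) = pvGrid N (fun i j => g (N - 1 - i) j) := by
  unfold hFlipP pvGrid
  exact pvRevMapRange N _

theorem pvGrid_rotate (N : Nat) (g : Nat → Nat → String) (hN : N ≠ 0) :
    rotateP (pvGrid N g) = pvGrid N (fun i j => g (N - 1 - j) i) := by
  unfold rotateP pvGrid
  rw [pvRevMapRange]
  rw [pvZipStar_grid N (List.range N) (fun a j => g (N - 1 - a) j)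
    (by simpa [List.range_eq_nil] using hN)]

theorem pvMap1_eq (n : Int) :
    ((PySem.List.pyRange 0 n 1).map (fun i =>
      (PySem.List.pyRange 0 n 1).map (fun j => pyChr (65 + PySem.Int.mod (i + j) 26))))
    = pvGrid n.toNat (fun i j => pyChr (65 + PySem.Int.mod ((i : Int) + (j : Int)) 26)) := by
  rw [PySem.List.pyRange_one]
  simp only [Int.sub_zero, List.map_map, pvGrid]
  apply List.map_congr_left
  intro i _
  simp

theorem pvSliceMapRange {α : Type} (M a b : Nat) (f : Nat → α) (h : a + b ≤ M) :
    (((List.range M).map f).drop a).take b = (List.range b).map (fun j => f (a + j)) := by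
  apply List.ext_getElem
  · simp; omega
  · intro i h1 h2
    simp

theorem pvAscRow (n : Int) (hn : 0 ≤ n) (s : Int) :
    PySem.List.slice
        ((PySem.List.pyRange 0 (n + 26) 1).map (fun k => pyChr (65 + k % 26)))
        (some (s % 26)) (some (s % 26 + n))
      = (List.range n.toNat).map (fun (j : Nat) => pyChr (65 + (s + (j : Int)) % 26)) := by
  rw [PySem.List.slice_toNat _ (by omega) (by omega)]
  have hcnt : (s % 26 + n).toNat - (s % 26).toNat = n.toNat := by omega
  rw [hcnt, PySem.List.pyRange_one]
  simp only [Int.sub_zero, List.map_map]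
  rw [pvSliceMapRange _ _ _ _ (by omega : (s % 26).toNat + n.toNat ≤ (n + 26).toNat)]
  apply List.map_congr_left
  intro j hj
  simp only [Function.comp_def]
  have harg : (65 : Int) + ((0 : Int) + (((s % 26).toNat + j : Nat) : Int)) % 26
      = 65 + (s + (j : Int)) % 26 := by omega
  rw [harg]

theorem pvMapPyRange {α : Type} (n : Int) (F : Int → α) :
    (PySem.List.pyRange 0 n 1).map F = (List.range n.toNat).map (fun (k : Nat) => F (k : Int)) := by
  rw [PySem.List.pyRange_one]
  simp only [Int.sub_zero, List.map_map]
  apply List.map_congr_left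
  intro k _
  simp

-- ===== VERDICT (by name: the statement is the Claim_ definition above) =====
theorem generate_maps_spec : Claim_equal_generate_maps := by
  intro n _
  unfold Spec_generate_maps generate_maps generate_maps_alt
  simp only []
  by_cases hn : n ≤ 0
  · rw [PySem.List.pyRange_one_eq_nil hn]
    simp only [List.map_nil]
    refine Prod.ext rfl ?_
    simp only [vFlipP, hFlipP, rotateP, List.map_nil, List.reverse_nil, pvZipStar_nil]
    split_ifs <;> rfl
  · replace hn : 0 < n := by omega
    have hNn : (n.toNat : Int) = n := Int.toNat_of_nonneg (le_of_lt hn)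
    have hN0 : n.toNat ≠ 0 := by omega
    have hmod : PySem.Int.mod n 8 = n % 8 := PySem.Int.mod_eq_emod_of_pos (by norm_num)
    have hcell : ∀ x : Int, PySem.Int.mod x 26 = x % 26 := fun x =>
      PySem.Int.mod_eq_emod_of_pos (by norm_num)
    have hmap1 : ((PySem.List.pyRange 0 n 1).map (fun i =>
          (PySem.List.pyRange 0 n 1).map (fun j => pyChr (65 + PySem.Int.mod (i + j) 26))))
        = pvGrid n.toNat (fun i j => pyChr (65 + ((i : Int) + (j : Int)) % 26)) := by
      rw [pvMap1_eq]
      simp only [hcell]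
    have hrev : ∀ xs : List String, (PySem.List.slice? xs none none (-1)).getD [] = xs.reverse := by
      intro xs
      rw [PySem.List.slice?_none_none_neg_one]
      rfl
    refine Prod.ext ?_ ?_
    · -- map1: grid vs slices of the cyclic row
      rw [hmap1]
      simp only [hcell]
      rw [pvMapPyRange]
      unfold pvGrid
      apply List.map_congr_left
      intro i _
      simp only []
      rw [pvAscRow n (by omega) (i : Int)]
    · rw [hmap1, hmod]
      have h8 : n % 8 = 0 ∨ n % 8 = 1 ∨ n % 8 = 2 ∨ n % 8 = 3 ∨ n % 8 = 4 ∨ n % 8 = 5 ∨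
          n % 8 = 6 ∨ n % 8 = 7 := by omega
      rcases h8 with ht | ht | ht | ht | ht | ht | ht | ht <;> rw [ht] <;> norm_num <;>
          rw [pvMapPyRange]
      · -- t = 0 : copy vs ascending slices
        unfold pvGrid
        apply List.map_congr_left
        intro i _
        simp only []
        rw [pvAscRow n (by omega) (i : Int)]
      · -- t = 1 : vFlip vs reversed ascending slices
        rw [pvGrid_vFlip]
        unfold pvGrid
        apply List.map_congr_left
        intro i _
        simp only []
        rw [hrev, pvAscRow n (by omega) (i : Int), pvRevMapRange]
      · -- t = 2 : hFlip vs slices starting at n-1-i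
        rw [pvGrid_hFlip]
        unfold pvGrid
        apply List.map_congr_left
        intro i hi
        rw [List.mem_range] at hi
        simp only []
        rw [pvAscRow n (by omega) (n - 1 - (i : Int))]
        apply List.map_congr_left
        intro j _
        have h : ((n.toNat - 1 - i : Nat) : Int) + (j : Int) = n - 1 - i + j := by omega
        rw [h]
      · -- t = 3 : vFlip ∘ hFlip vs reversed slices starting at n-1-i
        rw [pvGrid_hFlip, pvGrid_vFlip]
        unfold pvGrid
        apply List.map_congr_left
        intro i hi
        rw [List.mem_range] at hi
        simp only []
        rw [hrev, pvAscRow n (by omega) (n - 1 - (i : Int)), pvRevMapRange]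
        apply List.map_congr_left
        intro j hj
        rw [List.mem_range] at hj
        have h : ((n.toNat - 1 - i : Nat) : Int) + ((n.toNat - 1 - j : Nat) : Int)
            = n - 1 - i + ((n.toNat - 1 - j : Nat) : Int) := by omega
        rw [h]
      · -- t = 4 : rotate vs reversed ascending slices
        rw [pvGrid_rotate _ _ hN0]
        unfold pvGrid
        apply List.map_congr_left
        intro i _
        simp only []
        rw [hrev, pvAscRow n (by omega) (i : Int), pvRevMapRange]
        apply List.map_congr_left
        intro j hj
        rw [List.mem_range] at hj
        have h : ((n.toNat - 1 - j : Nat) : Int) + (i : Int)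
            = (i : Int) + ((n.toNat - 1 - j : Nat) : Int) := by omega
        rw [h]
      · -- t = 5 : rotate ∘ rotate vs reversed slices starting at n-1-i
        rw [pvGrid_rotate _ _ hN0, pvGrid_rotate _ _ hN0]
        unfold pvGrid
        apply List.map_congr_left
        intro i hi
        rw [List.mem_range] at hi
        simp only []
        rw [hrev, pvAscRow n (by omega) (n - 1 - (i : Int)), pvRevMapRange]
        apply List.map_congr_left
        intro j hj
        rw [List.mem_range] at hj
        have h : ((n.toNat - 1 - i : Nat) : Int) + ((n.toNat - 1 - j : Nat) : Int)
            = n - 1 - i + ((n.toNat - 1 - j : Nat) : Int) := by omega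
        rw [h]
      · -- t = 6 : vFlip ∘ rotate vs ascending slices
        rw [pvGrid_rotate _ _ hN0, pvGrid_vFlip]
        unfold pvGrid
        apply List.map_congr_left
        intro i _
        simp only []
        rw [pvAscRow n (by omega) (i : Int)]
        apply List.map_congr_left
        intro j hj
        rw [List.mem_range] at hj
        have h : ((n.toNat - 1 - (n.toNat - 1 - j) : Nat) : Int) + (i : Int)
            = (i : Int) + (j : Int) := by omega
        rw [h]
      · -- t = 7 : hFlip ∘ rotate vs reversed slices starting at n-1-i
        rw [pvGrid_rotate _ _ hN0, pvGrid_hFlip]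
        unfold pvGrid
        apply List.map_congr_left
        intro i hi
        rw [List.mem_range] at hi
        simp only []
        rw [hrev, pvAscRow n (by omega) (n - 1 - (i : Int)), pvRevMapRange]
        apply List.map_congr_left
        intro j hj
        rw [List.mem_range] at hj
        have h : ((n.toNat - 1 - j : Nat) : Int) + ((n.toNat - 1 - i : Nat) : Int)
            = n - 1 - i + ((n.toNat - 1 - j : Nat) : Int) := by omega
        rw [h]
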